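-- pv_equiv track=rewrite | github.com/alexandraback/datacollection | solutions_5636311922769920_1/Python/dvolgyes/problemD.py | solve
-- ===== SOURCE A (Python) =====
-- def convert(a,b,K,C):
--     position = 0
--     cnt = 0
--     for i in reversed(range(a,b)):
--         cnt = 0
--         position += i*K**cnt
--         cnt+=1
--     return position+1
--
-- def solve(K,C,S):
--     nr = (K // C)
--     remaining = K % C
--     if S<nr: return "IMPOSSIBLE"
--     if S==nr and remaining > 0: return "IMPOSSIBLE"
--
--     solution = ""
--
--     i=0
--     while i<nr:
--         solution += " "+str(convert(i*C,(i+1)*C,K,C))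
--         i+=1
--     if remaining > 0:
--         solution += " "+str(convert(i*C,K,K,C))
--
--     return solution.strip()
-- ===== SOURCE B (Python) =====
-- def _block(a, b):
--     # first label of the block [a, b): arithmetic-series closed form of A's convert loop
--     return str((a + b - 1) * (b - a) // 2 + 1) if a < b else "1"
--
-- def solve(K, C, S):
--     nr, rem = divmod(K, C)
--     if S < nr or (S == nr and rem > 0):
--         return "IMPOSSIBLE"
--     parts = [_block(i * C, (i + 1) * C) for i in range(nr)]
--     if rem > 0:
--         parts.append(_block(nr * C, K))
--     return " ".join(parts)
-- ===== Notes on version B (the rewrite author's own statement) =====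
-- stated objective: faster
-- what changed: B replaces convert's per-element summation loop with the arithmetic-series closed form (a+b-1)(b-a)//2+1 and builds the output as a map over block indices joined with ' ' instead of a counted while-loop accumulating into a stripped string.
-- intended difference: When K//C < 0 with K%C > 0 and S > K//C, A's while loop never runs so its leftover counter i=0 makes A label the partial block from 0 and return "1"; B starts the partial block after the nr full blocks at nr*C (returning e.g. "-5" for K=-5,C=2,S=0), which is the intended labelling. — e.g. on solve(-5, 2, 0): A returns "1", B returns "-5"
import Mathlib
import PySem

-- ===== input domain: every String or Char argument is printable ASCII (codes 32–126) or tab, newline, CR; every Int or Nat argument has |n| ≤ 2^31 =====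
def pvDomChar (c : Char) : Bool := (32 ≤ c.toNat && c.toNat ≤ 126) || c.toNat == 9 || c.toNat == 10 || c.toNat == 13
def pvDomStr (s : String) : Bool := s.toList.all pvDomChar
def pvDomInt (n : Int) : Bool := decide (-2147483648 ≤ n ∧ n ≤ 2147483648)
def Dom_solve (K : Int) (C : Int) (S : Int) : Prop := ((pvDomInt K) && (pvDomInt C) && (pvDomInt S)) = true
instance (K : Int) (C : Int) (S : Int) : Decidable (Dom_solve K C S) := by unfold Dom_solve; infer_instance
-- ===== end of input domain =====

-- B replaces A's per-element summation loop (convert) by the arithmetic-series closed form and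
-- builds the result with a map + join instead of a counted while-loop accumulating a string; on
-- the degenerate inputs D_solve (K//C < 0 with a positive remainder) A's leftover loop counter
-- makes it label the partial block from 0, B labels it from nr*C as intended.


-- ===== PORT A =====
-- convert(a,b,K,C): cnt is reset to 0 at the top of every iteration, so each step adds i * K**0.
def convertA (a b K C : Int) : Int :=
  let st := ((PySem.List.pyRange a b 1).reverse).foldl
    (fun (st : Int × Int) (i : Int) =>
      (st.1 + i * K ^ ((0 : Int)).toNat, (0 : Int) + 1)) (0, 0)
  st.1 + 1

def solve (K : Int) (C : Int) (S : Int) : String :=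
  let nr := PySem.Int.floordiv K C
  let remaining := PySem.Int.mod K C
  if S < nr then "IMPOSSIBLE"
  else if S = nr ∧ remaining > 0 then "IMPOSSIBLE"
  else
    -- 'i = 0; while i < nr: …; i += 1' — the range is the trip count, i travels in the fold state
    let st := (PySem.List.pyRange 0 nr 1).foldl
      (fun (st : String × Int) (_ : Int) =>
        (st.1 ++ " " ++ PySem.Int.toStr (convertA (st.2 * C) ((st.2 + 1) * C) K C), st.2 + 1))
      ("", 0)
    let solution := if remaining > 0 then
        st.1 ++ " " ++ PySem.Int.toStr (convertA (st.2 * C) K K C)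
      else st.1
    PySem.Str.strip solution

-- ===== PORT B =====
def blockB (a b : Int) : String :=
  if a < b then PySem.Int.toStr (PySem.Int.floordiv ((a + b - 1) * (b - a)) 2 + 1) else "1"

def solve_alt (K : Int) (C : Int) (S : Int) : String :=
  let nr := PySem.Int.floordiv K C
  let rem := PySem.Int.mod K C
  if S < nr ∨ (S = nr ∧ rem > 0) then "IMPOSSIBLE"
  else
    let parts := (PySem.List.pyRange 0 nr 1).map (fun i => blockB (i * C) ((i + 1) * C))
    let parts := if rem > 0 then parts ++ [blockB (nr * C) K] else parts
    PySem.Str.join " " parts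

-- ===== PRECONDITION & SPEC =====
-- Pre_ excludes only C = 0, where Python's K // C raises ZeroDivisionError.
def Pre_solve (K : Int) (C : Int) (S : Int) : Prop := C ≠ 0
instance (K : Int) (C : Int) (S : Int) : Decidable (Pre_solve K C S) := by unfold Pre_solve; infer_instance
def pvWitness_solve : Int × Int × Int := (7, 2, 5)

-- When K//C < 0 with K%C > 0 (and S makes a solution possible), A's while loop never runs, so its
-- leftover counter i=0 makes A label the partial block from 0 and return "1"; B starts the partial
-- block after the nr full blocks, at nr*C, which is the intended labelling.
def D_solve (K : Int) (C : Int) (S : Int) : Prop :=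
  0 < PySem.Int.mod K C ∧ PySem.Int.floordiv K C < 0 ∧ PySem.Int.floordiv K C < S
instance (K : Int) (C : Int) (S : Int) : Decidable (D_solve K C S) := by unfold D_solve; infer_instance

def Spec_solve (K : Int) (C : Int) (S : Int) (out : String) : Prop := ¬ D_solve K C S → out = solve_alt K C S
instance (K : Int) (C : Int) (S : Int) (out : String) : Decidable (Spec_solve K C S out) := by unfold Spec_solve; infer_instance

def pvDiffWitness_solve : Int × Int × Int := (-5, 2, 0)
def pvDiffWitnessOut_solve : String × String := ("1", "-5")

-- ===== CLAIM (what is proved, stated in full; the proofs are below) =====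
def Claim_unchanged_solve : Prop := ∀ (K : Int) (C : Int) (S : Int), Dom_solve K C S → Pre_solve K C S → Spec_solve K C S (solve K C S)
def Claim_changed_solve : Prop := Dom_solve (pvDiffWitness_solve.1) (pvDiffWitness_solve.2.1) (pvDiffWitness_solve.2.2) ∧ Pre_solve (pvDiffWitness_solve.1) (pvDiffWitness_solve.2.1) (pvDiffWitness_solve.2.2) ∧ D_solve (pvDiffWitness_solve.1) (pvDiffWitness_solve.2.1) (pvDiffWitness_solve.2.2) ∧ solve (pvDiffWitness_solve.1) (pvDiffWitness_solve.2.1) (pvDiffWitness_solve.2.2) = pvDiffWitnessOut_solve.1 ∧ solve_alt (pvDiffWitness_solve.1) (pvDiffWitness_solve.2.1) (pvDiffWitness_solve.2.2) = pvDiffWitnessOut_solve.2 ∧ pvDiffWitnessOut_solve.1 ≠ pvDiffWitnessOut_solve.2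
def Claim_exact_solve : Prop := ∀ (K : Int) (C : Int) (S : Int), Dom_solve K C S → Pre_solve K C S → D_solve K C S → solve K C S ≠ solve_alt K C S

-- ===== LEMMAS AND PROOFS =====

-- the running sum of A's convert loop
lemma convertA_fold_fst (K : Int) : ∀ (l : List Int) (p : Int × Int),
    (l.foldl (fun (st : Int × Int) (i : Int) =>
      (st.1 + i * K ^ ((0 : Int)).toNat, (0 : Int) + 1)) p).1 = p.1 + l.sum := by
  intro l
  induction l with
  | nil => intro p; simp
  | cons x xs ih => intro p; rw [List.foldl_cons, ih, List.sum_cons]; simp; ring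

lemma sum_pyRange_two_mul : ∀ (n : Nat) (a b : Int), (b - a).toNat = n → a ≤ b →
    2 * (PySem.List.pyRange a b 1).sum = (a + b - 1) * (b - a) := by
  intro n
  induction n with
  | zero =>
    intro a b hn hab
    have hba : b = a := by omega
    subst hba
    simp [PySem.List.pyRange_one_eq_nil le_rfl]
  | succ m ih =>
    intro a b hn hab
    have hlt : a < b := by omega
    rw [PySem.List.pyRange_one_cons hlt, List.sum_cons]
    have h2 := ih (a + 1) b (by omega) (by omega)
    nlinarith [h2]

lemma convertA_eq (a b K C : Int) :
    convertA a b K C = if a < b then PySem.Int.floordiv ((a + b - 1) * (b - a)) 2 + 1 else 1 := by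
  simp only [convertA]
  rw [convertA_fold_fst K]
  simp only [List.sum_reverse]
  by_cases h : a < b
  · have hsum := sum_pyRange_two_mul (b - a).toNat a b rfl (by omega)
    have hfd : PySem.Int.floordiv ((a + b - 1) * (b - a)) 2 = (PySem.List.pyRange a b 1).sum := by
      rw [(PySem.Int.floordiv_eq_iff_of_pos (by omega)).2]
      omega
    rw [if_pos h, hfd]; ring
  · rw [PySem.List.pyRange_one_eq_nil (by omega)]
    simp [h]

lemma toStr_convertA_eq_blockB (a b K C : Int) :
    PySem.Int.toStr (convertA a b K C) = blockB a b := by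
  rw [convertA_eq]
  unfold blockB
  split_ifs <;> rfl

lemma digitChar_not_space (d : Nat) : PySem.Chars.isspace (Nat.digitChar d) = false := by
  by_cases h : d ≤ 15
  · interval_cases d <;> decide
  · have hd : Nat.digitChar d = '*' := by
      unfold Nat.digitChar
      repeat rw [if_neg (by omega)]
    rw [hd]; decide

lemma toDigitsCore_succ (b f n : Nat) (ds : List Char) :
    Nat.toDigitsCore b (f + 1) n ds =
      if n / b = 0 then Nat.digitChar (n % b) :: ds
      else Nat.toDigitsCore b f (n / b) (Nat.digitChar (n % b) :: ds) := rfl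

lemma toDigitsCore_nospace : ∀ (f n : Nat) (ds : List Char),
    (∀ c ∈ ds, PySem.Chars.isspace c = false) →
    ∀ c ∈ Nat.toDigitsCore 10 f n ds, PySem.Chars.isspace c = false := by
  intro f
  induction f with
  | zero => intro n ds h; exact h
  | succ m ih =>
    intro n ds h c hc
    rw [toDigitsCore_succ] at hc
    split_ifs at hc with h10
    · rcases List.mem_cons.1 hc with h1 | h1
      · subst h1; exact digitChar_not_space _
      · exact h c h1
    · exact ih (n / 10) _ (by
        intro c' hc'
        rcases List.mem_cons.1 hc' with h1 | h1
        · subst h1; exact digitChar_not_space _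
        · exact h c' h1) c hc

lemma toDigitsCore_ne_nil : ∀ (f n : Nat) (ds : List Char), ds ≠ [] →
    Nat.toDigitsCore 10 f n ds ≠ [] := by
  intro f
  induction f with
  | zero => intro n ds h; exact h
  | succ m ih =>
    intro n ds h
    rw [toDigitsCore_succ]
    split_ifs
    · simp
    · exact ih _ _ (by simp)

lemma toChars_nospace (n : Int) : ∀ c ∈ PySem.Int.toChars n, PySem.Chars.isspace c = false := by
  unfold PySem.Int.toChars Nat.toDigits
  split_ifs with h
  · intro c hc
    rcases List.mem_cons.1 hc with h1 | h1
    · subst h1; decide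
    · exact toDigitsCore_nospace _ _ [] (by simp) c h1
  · exact toDigitsCore_nospace _ _ [] (by simp)

lemma toChars_ne_nil (n : Int) : PySem.Int.toChars n ≠ [] := by
  unfold PySem.Int.toChars Nat.toDigits
  split_ifs with h
  · simp
  · rw [toDigitsCore_succ]
    split_ifs
    · simp
    · exact toDigitsCore_ne_nil _ _ _ (by simp)

def GoodPart (q : List Char) : Prop := q ≠ [] ∧ ∀ c ∈ q, PySem.Chars.isspace c = false

lemma toStr_good (n : Int) : GoodPart (PySem.Int.toStr n).toList := by
  rw [PySem.Int.toList_toStr]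
  exact ⟨toChars_ne_nil n, toChars_nospace n⟩

lemma blockB_good (a b : Int) : GoodPart (blockB a b).toList := by
  unfold blockB
  split_ifs
  · exact toStr_good _
  · refine ⟨?_, ?_⟩
    · rw [show "1".toList = ['1'] from rfl]; simp
    · rw [show "1".toList = ['1'] from rfl]
      intro c hc
      rw [List.mem_singleton.1 hc]
      rfl

-- A's counted while-loop as a fold over the mapped parts
lemma loopA (K C : Int) : ∀ (n : Nat) (a b : Int), (b - a).toNat = n → ∀ (acc : String),
    (PySem.List.pyRange a b 1).foldl
      (fun (st : String × Int) (_ : Int) =>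
        (st.1 ++ " " ++ PySem.Int.toStr (convertA (st.2 * C) ((st.2 + 1) * C) K C), st.2 + 1))
      (acc, a)
    = (((PySem.List.pyRange a b 1).map
          (fun i => PySem.Int.toStr (convertA (i * C) ((i + 1) * C) K C))).foldl
        (fun s p => s ++ " " ++ p) acc,
       if a < b then b else a) := by
  intro n
  induction n with
  | zero =>
    intro a b hn acc
    rw [PySem.List.pyRange_one_eq_nil (by omega)]
    simp
    omega
  | succ m ih =>
    intro a b hn acc
    have hlt : a < b := by omega
    rw [PySem.List.pyRange_one_cons hlt]
    simp only [List.foldl_cons, List.map_cons]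
    rw [ih (a + 1) b (by omega)]
    have hif : (if a + 1 < b then b else a + 1) = if a < b then b else a := by
      split_ifs <;> omega
    rw [hif]

lemma foldl_append_toList : ∀ (ps : List String) (acc : String),
    (ps.foldl (fun s p => s ++ " " ++ p) acc).toList
    = acc.toList ++ ps.flatMap (fun p => ' ' :: p.toList) := by
  intro ps
  induction ps with
  | nil => intro acc; simp
  | cons p ps ih =>
    intro acc
    rw [List.foldl_cons, ih, List.flatMap_cons]
    simp [String.toList_append]

lemma intercalate_cons_flatMap : ∀ (ps : List (List Char)) (p : List Char),
    List.intercalate [' '] (p :: ps) = p ++ ps.flatMap (fun q => ' ' :: q) := by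
  intro ps
  induction ps with
  | nil => intro p; simp [List.intercalate]
  | cons q qs ih =>
    intro p
    have h2 : List.intercalate [' '] (p :: q :: qs) = p ++ [' '] ++ List.intercalate [' '] (q :: qs) := by
      simp [List.intercalate, List.intersperse]
    rw [h2, ih q, List.flatMap_cons]
    simp

lemma getLast_flat_nospace : ∀ (ps : List (List Char)), (∀ q ∈ ps, GoodPart q) →
    ∀ (p : List Char), GoodPart p →
    ∃ c, (p ++ ps.flatMap (fun q => ' ' :: q)).getLast? = some c ∧ PySem.Chars.isspace c = false := by
  intro ps
  induction ps with
  | nil =>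
    intro _ p hp
    rcases hp with ⟨hne, hns⟩
    exact ⟨p.getLast hne, by simpa using List.getLast?_eq_some_getLast hne,
      hns _ (List.getLast_mem hne)⟩
  | cons q qs ih =>
    intro h p hp
    obtain ⟨c, hc, hcs⟩ := ih (fun x hx => h x (List.mem_cons_of_mem _ hx)) q (h q List.mem_cons_self)
    refine ⟨c, ?_, hcs⟩
    rw [List.flatMap_cons]
    have h1 : ((' ' :: q) ++ List.flatMap (fun q => ' ' :: q) qs).getLast? = some c := by
      rw [show ((' ' :: q) ++ List.flatMap (fun q => ' ' :: q) qs)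
            = [' '] ++ (q ++ List.flatMap (fun q => ' ' :: q) qs) by simp, List.getLast?_append, hc]
      rfl
    rw [List.getLast?_append, h1]
    rfl

lemma rstrip_eq_self (l : List Char) (c : Char) (h : l.getLast? = some c)
    (hc : PySem.Chars.isspace c = false) : PySem.Chars.rstrip l = l := by
  unfold PySem.Chars.rstrip
  have hh : l.reverse.head? = some c := by rw [List.head?_reverse, h]
  obtain ⟨t, ht⟩ := List.head?_eq_some_iff.1 hh
  rw [ht, List.dropWhile_cons, if_neg (by simp [hc]), ← ht, List.reverse_reverse]

lemma strip_flat (ps : List (List Char)) (h : ∀ q ∈ ps, GoodPart q) :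
    PySem.Chars.strip (ps.flatMap (fun q => ' ' :: q)) = List.intercalate [' '] ps := by
  rcases ps with _ | ⟨p, ps'⟩
  · simp [List.intercalate]; decide
  · obtain ⟨hpne, hpns⟩ := h p List.mem_cons_self
    obtain ⟨c, hc, hcs⟩ :=
      getLast_flat_nospace ps' (fun x hx => h x (List.mem_cons_of_mem _ hx)) p ⟨hpne, hpns⟩
    rw [List.flatMap_cons, intercalate_cons_flatMap]
    unfold PySem.Chars.strip PySem.Chars.lstrip
    have hl : List.dropWhile PySem.Chars.isspace ((' ' :: p) ++ List.flatMap (fun q => ' ' :: q) ps')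
        = p ++ List.flatMap (fun q => ' ' :: q) ps' := by
      rcases p with _ | ⟨x, xs⟩
      · exact absurd rfl hpne
      · simp only [List.cons_append, List.dropWhile_cons]
        rw [if_pos (by decide), if_neg (by simp [hpns x List.mem_cons_self])]
    rw [hl]
    exact rstrip_eq_self _ c hc hcs

-- the strip-vs-join bridge, stated on Strings
lemma strip_fold_eq_join (ps : List String) (h : ∀ p ∈ ps, GoodPart p.toList) :
    PySem.Str.strip (ps.foldl (fun s p => s ++ " " ++ p) "") = PySem.Str.join " " ps := by
  unfold PySem.Str.strip PySem.Str.join PySem.Chars.join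
  apply congrArg String.ofList
  rw [foldl_append_toList]
  have hflat : ps.flatMap (fun p => ' ' :: p.toList)
      = (ps.map String.toList).flatMap (fun q => ' ' :: q) := by
    rw [List.flatMap_map]
  simp only [String.toList_empty, List.nil_append] at *
  rw [hflat, strip_flat]
  · rfl
  · intro q hq
    obtain ⟨p, hp, rfl⟩ := List.mem_map.1 hq
    exact h p hp

-- ===== VERDICT (by name: the statement is the Claim_ definition above) =====
theorem solve_spec : Claim_unchanged_solve := by
  intro K C S _ hpre hnd
  show solve K C S = solve_alt K C S
  unfold D_solve at hnd
  simp only [solve, solve_alt]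
  by_cases h1 : S < PySem.Int.floordiv K C
  · rw [if_pos h1, if_pos (Or.inl h1)]
  by_cases h2 : S = PySem.Int.floordiv K C ∧ PySem.Int.mod K C > 0
  · rw [if_neg h1, if_pos h2, if_pos (Or.inr h2)]
  rw [if_neg h1, if_neg h2, if_neg (by tauto :
    ¬(S < PySem.Int.floordiv K C ∨ S = PySem.Int.floordiv K C ∧ PySem.Int.mod K C > 0))]
  rw [loopA K C (PySem.Int.floordiv K C - 0).toNat 0 (PySem.Int.floordiv K C) rfl ""]
  by_cases hrem : PySem.Int.mod K C > 0
  · have hnr : 0 ≤ PySem.Int.floordiv K C := by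
      by_contra hneg'
      have hneg : PySem.Int.floordiv K C < 0 := by omega
      have hS : PySem.Int.floordiv K C < S := by
        rcases lt_or_eq_of_le (not_lt.1 h1) with h | h
        · exact h
        · exact absurd ⟨h.symm, hrem⟩ h2
      exact hnd ⟨hrem, hneg, hS⟩
    rw [if_pos hrem, if_pos hrem]
    have hi : (if (0:Int) < PySem.Int.floordiv K C then PySem.Int.floordiv K C else 0)
        = PySem.Int.floordiv K C := by split_ifs <;> omega
    rw [hi, toStr_convertA_eq_blockB]
    rw [show ∀ (s t : String), s ++ " " ++ t
          = List.foldl (fun s p => s ++ " " ++ p) s [t] from fun s t => rfl]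
    rw [← List.foldl_append]
    simp only [toStr_convertA_eq_blockB]
    apply strip_fold_eq_join
    intro p hp
    rcases List.mem_append.1 hp with h | h
    · obtain ⟨i, _, rfl⟩ := List.mem_map.1 h
      exact blockB_good _ _
    · rw [List.mem_singleton.1 h]
      exact blockB_good _ _
  · rw [if_neg hrem, if_neg hrem]
    simp only [toStr_convertA_eq_blockB]
    apply strip_fold_eq_join
    intro p hp
    obtain ⟨i, _, rfl⟩ := List.mem_map.1 hp
    exact blockB_good _ _

theorem solve_changed : Claim_changed_solve := by
  unfold Claim_changed_solve; decide

theorem solve_tight : Claim_exact_solve := by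
  intro K C S _ hpre hd
  obtain ⟨hrem, hnr, hS⟩ := hd
  have hC : 0 < C := by
    rcases lt_trichotomy C 0 with h | h | h
    · have := PySem.Int.mod_neg_bounds (a := K) h
      omega
    · exact absurd h hpre
    · exact h
  have hK : K < 0 := by
    by_contra hk
    have h0 : (0:Int) ≤ K := by omega
    have := (PySem.Int.le_floordiv_iff_mul_le (a := K) (b := C) (q := 0) hC).2 (by omega)
    omega
  have hmul := PySem.Int.floordiv_mul_add_mod K C
  -- A evaluates to "1"
  have hA : solve K C S = "1" := by
    simp only [solve]
    rw [if_neg (by omega), if_neg (by rintro ⟨h, -⟩; omega)]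
    rw [PySem.List.pyRange_one_eq_nil (by omega)]
    simp only [List.foldl_nil]
    rw [if_pos hrem]
    rw [convertA_eq]
    rw [if_neg (by simpa using by omega : ¬ ((0:Int) * C < K))]
    decide
  -- B evaluates to blockB (nr*C) K with a value ≤ 0
  have hlt : PySem.Int.floordiv K C * C < K := by omega
  have hB : solve_alt K C S = PySem.Int.toStr
      (PySem.Int.floordiv ((PySem.Int.floordiv K C * C + K - 1) * (K - PySem.Int.floordiv K C * C)) 2 + 1) := by
    simp only [solve_alt]
    rw [if_neg (by rintro (h | ⟨h, -⟩) <;> omega)]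
    rw [PySem.List.pyRange_one_eq_nil (by omega)]
    simp only [List.map_nil, List.nil_append, if_pos hrem]
    unfold blockB
    rw [if_pos hlt]
    unfold PySem.Str.join PySem.Chars.join
    simp only [List.map_cons, List.map_nil]
    rw [show List.intercalate " ".toList [(PySem.Int.toStr (PySem.Int.floordiv ((PySem.Int.floordiv K C * C + K - 1) * (K - PySem.Int.floordiv K C * C)) 2 + 1)).toList] = (PySem.Int.toStr (PySem.Int.floordiv ((PySem.Int.floordiv K C * C + K - 1) * (K - PySem.Int.floordiv K C * C)) 2 + 1)).toList by simp [List.intercalate]]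
    rw [String.ofList_toList]
  have hv : PySem.Int.floordiv ((PySem.Int.floordiv K C * C + K - 1) * (K - PySem.Int.floordiv K C * C)) 2 + 1 ≤ 0 := by
    have hPneg : (PySem.Int.floordiv K C * C + K - 1) * (K - PySem.Int.floordiv K C * C) < 0 := by
      have h1 : PySem.Int.floordiv K C * C + K - 1 < 0 := by omega
      have h2 : 0 < K - PySem.Int.floordiv K C * C := by omega
      nlinarith
    have := (PySem.Int.floordiv_lt_iff_lt_mul (a := (PySem.Int.floordiv K C * C + K - 1) * (K - PySem.Int.floordiv K C * C)) (b := 2) (q := 0) (by omega)).2 (by omega)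
    omega
  rw [hA, hB]
  intro heq
  set v : Int := PySem.Int.floordiv ((PySem.Int.floordiv K C * C + K - 1) * (K - PySem.Int.floordiv K C * C)) 2 + 1 with hvdef
  rcases lt_or_eq_of_le hv with hvlt | hv0
  · have htl := congrArg String.toList heq
    rw [PySem.Int.toList_toStr] at htl
    unfold PySem.Int.toChars at htl
    rw [if_pos hvlt] at htl
    rw [show "1".toList = ['1'] from rfl] at htl
    exact absurd (List.cons.injEq .. ▸ htl).1 (by decide)
  · rw [hv0] at heq
    exact absurd heq (by decide)
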